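-- pv_equiv track=rewrite | github.com/lixiang007666/Algorithm_LanQiaobei | DP/gangtiaoqiege.py | cut_rod_recurision2
-- ===== SOURCE A (Python) =====
-- def cut_rod_recurision2(p, n):
--     if n == 0:
--         return 0
--     else:
--         res = 0
--         for i in range(1, n + 1):
--             res = max(res, p[i] + cut_rod_recurision2(p, n - i))#得有一个res做比较
--         return res
-- ===== SOURCE B (Python) =====
-- def cut_rod_recurision2(p, n):
--     # Bottom-up DP: dp[j] = best revenue for length j, each entry computed once from earlier entries.
--     if n <= 0:
--         return 0
--     dp = [0]
--     for j in range(1, n + 1):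
--         best = 0
--         for i in range(1, j + 1):
--             best = max(best, p[i] + dp[j - i])
--         dp.append(best)
--     return dp[n]
-- ===== Notes on version B (the rewrite author's own statement) =====
-- stated objective: alternative
-- what changed: Replaced A's top-down recursion over cut positions with a bottom-up dynamic-programming table dp[0..n], each entry computed once from earlier entries.
import Mathlib
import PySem

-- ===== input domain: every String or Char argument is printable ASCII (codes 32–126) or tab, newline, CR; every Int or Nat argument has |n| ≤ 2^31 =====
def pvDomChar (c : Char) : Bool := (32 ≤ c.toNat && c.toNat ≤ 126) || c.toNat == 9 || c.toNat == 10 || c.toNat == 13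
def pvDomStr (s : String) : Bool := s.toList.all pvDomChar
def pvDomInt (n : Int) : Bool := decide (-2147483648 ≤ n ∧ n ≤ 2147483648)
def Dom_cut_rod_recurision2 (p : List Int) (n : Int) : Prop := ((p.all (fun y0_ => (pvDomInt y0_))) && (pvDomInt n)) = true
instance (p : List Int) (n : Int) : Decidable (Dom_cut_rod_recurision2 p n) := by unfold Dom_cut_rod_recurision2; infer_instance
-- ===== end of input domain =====

-- B replaces A's top-down recursion by a bottom-up DP table; proved to return the same value wherever A returns.


-- ===== PORT A =====
-- 'for i in range(1, n+1): res = max(res, p[i] + cut_rod_recurision2(p, n-i))', fueled by n.toNat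
def cutRodA (p : List Int) : Nat → Int
  | 0 => 0
  | n+1 =>
    ((PySem.List.pyRange 1 ((n : Int)+1+1) 1).attach).foldl
      (fun res i => max res (PySem.List.pyGetD p i.1 0 + cutRodA p (((n : Int)+1 - i.1).toNat))) 0
termination_by n => n
decreasing_by
  have h := (PySem.List.mem_pyRange_one.mp i.2)
  omega

def cut_rod_recurision2 (p : List Int) (n : Int) : Int :=
  -- for n < 0 Python's loop 'range(1, n+1)' is empty and returns res = 0 = cutRodA p 0
  if n == 0 then 0 else cutRodA p n.toNat

-- ===== PORT B =====
def cut_rod_recurision2_alt (p : List Int) (n : Int) : Int :=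
  if n ≤ 0 then 0
  else
    let dp := (PySem.List.pyRange 1 (n+1) 1).foldl
      (fun dp j =>
        dp ++ [(PySem.List.pyRange 1 (j+1) 1).foldl
          (fun best i => max best (PySem.List.pyGetD p i 0 + PySem.List.pyGetD dp (j - i) 0)) 0]) [0]
    PySem.List.pyGetD dp n 0

-- ===== PRECONDITION & SPEC =====
-- Python A raises IndexError (p[i] with i up to n) exactly when n ≥ 1 and n ≥ len(p); those inputs are excluded.
def Pre_cut_rod_recurision2 (p : List Int) (n : Int) : Prop := n ≤ 0 ∨ n < (p.length : Int)
instance (p : List Int) (n : Int) : Decidable (Pre_cut_rod_recurision2 p n) := by unfold Pre_cut_rod_recurision2; infer_instance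
def pvWitness_cut_rod_recurision2 : List Int × Int := ([0, 1, 5, 8], 3)

def Spec_cut_rod_recurision2 (p : List Int) (n : Int) (out : Int) : Prop := out = cut_rod_recurision2_alt p n
instance (p : List Int) (n : Int) (out : Int) : Decidable (Spec_cut_rod_recurision2 p n out) := by unfold Spec_cut_rod_recurision2; infer_instance

-- ===== CLAIM (what is proved, stated in full; the proofs are below) =====
def Claim_equal_cut_rod_recurision2 : Prop := ∀ (p : List Int) (n : Int), Dom_cut_rod_recurision2 p n → Pre_cut_rod_recurision2 p n → Spec_cut_rod_recurision2 p n (cut_rod_recurision2 p n)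

-- ===== LEMMAS AND PROOFS =====

-- the inner loop of B, run with dp = [f 0, …, f m], computes exactly cutRodA p (m+1)
lemma inner_eq (p : List Int) (m : Nat) :
    (PySem.List.pyRange 1 ((m : Int)+1+1) 1).foldl
      (fun best i => max best (PySem.List.pyGetD p i 0 +
        PySem.List.pyGetD ((List.range (m+1)).map (cutRodA p)) (((m : Int)+1) - i) 0)) 0
    = cutRodA p (m+1) := by
  rw [cutRodA, ← List.foldl_attach]
  apply PySem.List.foldl_congr_mem
  intro acc i hi
  have h := PySem.List.mem_pyRange_one.mp i.2
  have hlt : ((m : Int) + 1) - i < (((List.range (m+1)).map (cutRodA p)).length : Int) := by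
    simp; omega
  rw [PySem.List.pyGetD_eq_getElem (List.map (cutRodA p) (List.range (m+1))) 0 (by omega) hlt]
  simp

-- B's outer fold builds the table of cutRodA values
lemma dp_build (p : List Int) (N : Nat) :
    (PySem.List.pyRange 1 ((N : Int)+1) 1).foldl
      (fun dp j =>
        dp ++ [(PySem.List.pyRange 1 (j+1) 1).foldl
          (fun best i => max best (PySem.List.pyGetD p i 0 + PySem.List.pyGetD dp (j - i) 0)) 0]) [0]
    = (List.range (N+1)).map (cutRodA p) := by
  induction N with
  | zero =>
    rw [PySem.List.pyRange_one_eq_nil (by norm_num)]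
    simp [cutRodA]
  | succ N ih =>
    have hcast : ((N + 1 : Nat) : Int) + 1 = ((N : Int) + 1) + 1 := by push_cast; ring
    rw [hcast, PySem.List.pyRange_one_succ_right (by omega), List.foldl_append, ih]
    simp only [List.foldl_cons, List.foldl_nil]
    rw [inner_eq p N]
    simp [List.range_succ]

-- ===== VERDICT (by name: the statement is the Claim_ definition above) =====
theorem cut_rod_recurision2_spec : Claim_equal_cut_rod_recurision2 := by
  intro p n _ _
  unfold Spec_cut_rod_recurision2 cut_rod_recurision2 cut_rod_recurision2_alt
  by_cases hpos : 0 < n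
  · have hne : (n == 0) = false := by simp; omega
    have hle : ¬ n ≤ 0 := by omega
    simp only [hne, if_neg hle, Bool.false_eq_true, if_false]
    have hN : n = ((n.toNat : Nat) : Int) := by omega
    rw [hN, dp_build p n.toNat]
    rw [PySem.List.pyGetD_natCast]
    simp
    congr 1
    omega
  · by_cases hz : n = 0
    · simp [hz]
    · have hne : (n == 0) = false := by simp [hz]
      have hle : n ≤ 0 := by omega
      have hN : n.toNat = 0 := by omega
      simp only [hne, Bool.false_eq_true, if_false, if_pos hle, hN]
      rw [cutRodA]
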